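-- pv_equiv track=rewrite | github.com/BrysonGray/slice_reg | slice_reg.py | turn_to_label
-- ===== SOURCE A (Python) =====
-- def turn_to_label(turn):
--
--     last_direction = ''
--     labels_ = []
--     for t in turn:
--         if t not in 'lrpn':
--             labels_.append(t)
--             if t in '1234':
--                 last_direction = t
--         else:
--             # compare to last direction
--             if last_direction == '1':
--                 if t == 'p':
--                     labels_.append('1')
--                 elif t == 'l':
--                     labels_.append('2')
--                 elif t == 'n':
--                     labels_.append('3')
--                 elif t == 'r':
--                     labels_.append('4')
--             elif last_direction == '2':
--                 if t == 'p':
--                     labels_.append('2')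
--                 elif t == 'l':
--                     labels_.append('3')
--                 elif t == 'n':
--                     labels_.append('4')
--                 elif t == 'r':
--                     labels_.append('1')
--             elif last_direction == '3':
--                 if t == 'p':
--                     labels_.append('3')
--                 elif t == 'l':
--                     labels_.append('4')
--                 elif t == 'n':
--                     labels_.append('1')
--                 elif t == 'r':
--                     labels_.append('2')
--             elif last_direction == '4':
--                 if t == 'p':
--                     labels_.append('4')
--                 elif t == 'l':
--                     labels_.append('1')
--                 elif t == 'n':
--                     labels_.append('2')
--                 elif t == 'r':
--                     labels_.append('3')
--
--             last_direction = labels_[-1]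
--     return ''.join(labels_)
-- ===== SOURCE B (Python) =====
-- def turn_to_label(turn):
--     # Staged algorithm: split the input at direction digits, then rewrite each
--     # digit-headed segment by cumulative rotation arithmetic, then join.
--     # (Turn chars before the first digit emit nothing, as in the original.)
--     segs = []   # non-digit segments
--     ds = []     # the digit (as int) that heads each segment after the first
--     cur = []
--     for c in turn:
--         if c in '1234':
--             ds.append(int(c))
--             segs.append(cur)
--             cur = []
--         else:
--             cur.append(c)
--     segs.append(cur)
--
--     parts = [''.join(c for c in segs[0] if c not in 'lrpn')]
--     for d, seg in zip(ds, segs[1:]):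
--         k = d
--         buf = [str(d)]
--         for c in seg:
--             if c in 'lrpn':
--                 k = (k - 1 + 'plnr'.find(c)) % 4 + 1
--                 buf.append(str(k))
--             else:
--                 buf.append(c)
--         parts.append(''.join(buf))
--     return ''.join(parts)
-- ===== Notes on version B (the rewrite author's own statement) =====
-- stated objective: alternative
-- what changed: Instead of A's single-pass state machine with a 16-way case tree and a labels_[-1] read-back, B splits the string into segments at the direction digits and then rewrites each digit-headed segment by cumulative modular rotation before joining the parts.
-- crash fix: On inputs whose first character is one of 'lrpn', A raises IndexError (labels_[-1] on an empty list); B returns the string with those leading turn characters dropped. — e.g. on turn_to_label("l"): A raises IndexError, B returns ""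
import Mathlib
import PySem

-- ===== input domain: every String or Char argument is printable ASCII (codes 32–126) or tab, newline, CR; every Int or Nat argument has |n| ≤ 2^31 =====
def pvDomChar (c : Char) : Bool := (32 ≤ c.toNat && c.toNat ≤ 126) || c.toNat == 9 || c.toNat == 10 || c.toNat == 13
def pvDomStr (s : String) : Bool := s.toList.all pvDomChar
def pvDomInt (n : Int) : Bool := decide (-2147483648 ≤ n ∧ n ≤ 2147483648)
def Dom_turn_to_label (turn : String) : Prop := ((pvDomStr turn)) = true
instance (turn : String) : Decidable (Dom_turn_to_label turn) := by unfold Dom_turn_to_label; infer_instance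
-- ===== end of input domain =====

-- B replaces A's single-pass state machine (16-way case tree + labels_[-1] read-back) by a
-- staged algorithm: split at direction digits, rewrite each digit-headed segment by
-- cumulative modular rotation, join (objective: alternative).

-- ===== PORT A =====
-- state = (last_direction, labels_); 't not in "lrpn"' with single-char t = char membership;
-- labels_[-1] on [] raises IndexError in Python (excluded by Pre_); the port uses getLastD "" there
def turnStepA (s : String × List String) (t : Char) : String × List String :=
  let ld := s.1
  let labels := s.2
  if t ∉ ['l', 'r', 'p', 'n'] then
    let labels := labels ++ [String.ofList [t]]
    let ld := if t ∈ ['1', '2', '3', '4'] then String.ofList [t] else ld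
    (ld, labels)
  else
    let labels :=
      if ld = "1" then
        if t = 'p' then labels ++ ["1"]
        else if t = 'l' then labels ++ ["2"]
        else if t = 'n' then labels ++ ["3"]
        else if t = 'r' then labels ++ ["4"]
        else labels
      else if ld = "2" then
        if t = 'p' then labels ++ ["2"]
        else if t = 'l' then labels ++ ["3"]
        else if t = 'n' then labels ++ ["4"]
        else if t = 'r' then labels ++ ["1"]
        else labels
      else if ld = "3" then
        if t = 'p' then labels ++ ["3"]
        else if t = 'l' then labels ++ ["4"]
        else if t = 'n' then labels ++ ["1"]
        else if t = 'r' then labels ++ ["2"]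
        else labels
      else if ld = "4" then
        if t = 'p' then labels ++ ["4"]
        else if t = 'l' then labels ++ ["1"]
        else if t = 'n' then labels ++ ["2"]
        else if t = 'r' then labels ++ ["3"]
        else labels
      else labels
    (labels.getLastD "", labels)

def turn_to_label (turn : String) : String :=
  PySem.Str.join "" ((turn.toList.foldl turnStepA ("", [])).2)

-- ===== PORT B =====
-- stage 1: split at digit chars; state = (segs, cur, ds); int(c) always succeeds inside
-- the guard, ported as (ofStr? _).getD 0
def bStage1Step (s : List (List Char) × List Char × List Int) (c : Char) :
    List (List Char) × List Char × List Int :=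
  if c ∈ ['1', '2', '3', '4'] then
    (s.1 ++ [s.2.1], [], s.2.2 ++ [(PySem.Int.ofStr? (String.ofList [c])).getD 0])
  else
    (s.1, s.2.1 ++ [c], s.2.2)

-- stage 2: rewrite one digit-headed segment; state = (k, buf)
def bStage2Step (s : Int × List String) (c : Char) : Int × List String :=
  if c ∈ ['l', 'r', 'p', 'n'] then
    let k := PySem.Int.mod (s.1 - 1 + PySem.Str.find "plnr" (String.ofList [c])) 4 + 1
    (k, s.2 ++ [PySem.Int.toStr k])
  else
    (s.1, s.2 ++ [String.ofList [c]])

def turn_to_label_alt (turn : String) : String :=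
  let st := turn.toList.foldl bStage1Step ([], [], [])
  let segs := st.1 ++ [st.2.1]
  let ds := st.2.2
  let parts :=
    [String.ofList (((PySem.List.pyGet? segs 0).getD []).filter (fun c => c ∉ ['l', 'r', 'p', 'n']))]
  let parts := (List.zip ds (PySem.List.slice segs (some 1) none)).foldl
    (fun parts p =>
      parts ++ [PySem.Str.join "" (p.2.foldl bStage2Step (p.1, [PySem.Int.toStr p.1])).2]) parts
  PySem.Str.join "" parts

-- ===== PRECONDITION & SPEC =====
-- Pre_ excludes exactly the inputs where Python A raises IndexError (labels_[-1] on an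
-- empty list): a first character in 'lrpn'.
def Pre_turn_to_label (turn : String) : Prop :=
  (turn.toList.head?.all (fun c => !(['l', 'r', 'p', 'n'].contains c))) = true
instance (turn : String) : Decidable (Pre_turn_to_label turn) := by
  unfold Pre_turn_to_label; infer_instance

def pvWitness_turn_to_label : String := "12lr3pn"

-- On inputs whose first character is one of 'lrpn', A raises IndexError (labels_[-1] on an
-- empty list); B returns the string with those leading turn characters dropped.
def Raises_turn_to_label (turn : String) : Prop :=
  (turn.toList.head?.any (fun c => ['l', 'r', 'p', 'n'].contains c)) = true
instance (turn : String) : Decidable (Raises_turn_to_label turn) := by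
  unfold Raises_turn_to_label; infer_instance

def pvRaiseWitness_turn_to_label : String := "l"
def pvRaiseWitnessOut_turn_to_label : String := ""

def Spec_turn_to_label (turn : String) (out : String) : Prop := out = turn_to_label_alt turn
instance (turn : String) (out : String) : Decidable (Spec_turn_to_label turn out) := by
  unfold Spec_turn_to_label; infer_instance

-- ===== CLAIM (what is proved, stated in full; the proofs are below) =====
def Claim_equal_turn_to_label : Prop := ∀ (turn : String), Dom_turn_to_label turn → Pre_turn_to_label turn → Spec_turn_to_label turn (turn_to_label turn)

def Claim_raises_turn_to_label : Prop := (∀ (turn : String), Dom_turn_to_label turn → Raises_turn_to_label turn → ¬ Pre_turn_to_label turn) ∧ (Dom_turn_to_label (pvRaiseWitness_turn_to_label) ∧ Raises_turn_to_label (pvRaiseWitness_turn_to_label) ∧ turn_to_label_alt (pvRaiseWitness_turn_to_label) = pvRaiseWitnessOut_turn_to_label)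

-- ===== LEMMAS AND PROOFS =====

-- the rotation B's stage 2 applies to the running direction k on turn char c
def rotB (k : Int) (c : Char) : Int :=
  PySem.Int.mod (k - 1 + PySem.Str.find "plnr" (String.ofList [c])) 4 + 1

-- the labels B's stage 2 loop appends for one segment, given incoming direction k
def rew (k : Int) : List Char → List String
  | [] => []
  | c :: cs =>
    if c ∈ ['l', 'r', 'p', 'n'] then PySem.Int.toStr (rotB k c) :: rew (rotB k c) cs
    else String.ofList [c] :: rew k cs

-- recursive form of B's stage-1 split: (first segment, [(digit, following segment), …])
def splitDg : List Char → List Char × List (Int × List Char)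
  | [] => ([], [])
  | c :: cs =>
    if c ∈ ['1', '2', '3', '4'] then
      ([], ((PySem.Int.ofStr? (String.ofList [c])).getD 0, (splitDg cs).1) :: (splitDg cs).2)
    else
      (c :: (splitDg cs).1, (splitDg cs).2)

-- A's last_direction, read as an optional direction value
def dirOf (ld : String) : Option Int :=
  if ld = "1" then some 1 else if ld = "2" then some 2
  else if ld = "3" then some 3 else if ld = "4" then some 4 else none

-- the labels A appends while scanning cs with current direction d
def outA (d : Option Int) : List Char → List String
  | [] => []
  | c :: cs =>
    if c ∉ ['l', 'r', 'p', 'n'] then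
      String.ofList [c] ::
        outA (if c ∈ ['1', '2', '3', '4'] then some ((PySem.Int.ofStr? (String.ofList [c])).getD 0) else d) cs
    else
      match d with
      | none => outA none cs
      | some k => PySem.Int.toStr (rotB k c) :: outA (some (rotB k c)) cs

-- flattened character content of a list of label strings
def J (parts : List String) : List Char := (parts.map String.toList).flatten

-- character content contributed by the digit-headed segments
def emit (ps : List (Int × List Char)) : List Char :=
  (ps.map (fun p => (PySem.Int.toStr p.1).toList ++ J (rew p.1 p.2))).flatten

-- invariant of A's loop: before any direction digit, the last appended label is no digit either
def InvA (ld : String) (labels : List String) : Prop :=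
  dirOf ld = none → dirOf (labels.getLastD "") = none

theorem join_nil_flatten (xss : List (List Char)) : PySem.Chars.join [] xss = xss.flatten := by
  induction xss with
  | nil => rfl
  | cons h t ih =>
    cases t with
    | nil => simp [PySem.Chars.join, List.intercalate]
    | cons h2 t2 =>
      simp only [PySem.Chars.join, List.intercalate] at *
      simp_all [List.intersperse]

theorem toList_join_nil (parts : List String) :
    (PySem.Str.join "" parts).toList = J parts := by
  rw [PySem.Str.toList_join]
  simpa [J] using join_nil_flatten (parts.map String.toList)

theorem slice_one (xs : List (List Char)) : PySem.List.slice xs (some 1) none = xs.drop 1 := by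
  simp [PySem.List.slice]
  cases xs <;> simp

theorem pyGet?_zero (x : List Char) (l : List (List Char)) :
    PySem.List.pyGet? (x :: l) (0 : Int) = some x := by
  simp [PySem.List.pyGet?, PySem.List.pyIdx?]

theorem rot_mem (k : Int) (c : Char) :
    rotB k c = 1 ∨ rotB k c = 2 ∨ rotB k c = 3 ∨ rotB k c = 4 := by
  have h0 := PySem.Int.mod_nonneg (k - 1 + PySem.Str.find "plnr" (String.ofList [c])) (show (0:Int) < 4 by norm_num)
  have h1 := PySem.Int.mod_lt (k - 1 + PySem.Str.find "plnr" (String.ofList [c])) (show (0:Int) < 4 by norm_num)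
  unfold rotB; omega

theorem dirOf_rot (k : Int) (c : Char) :
    dirOf (PySem.Int.toStr (rotB k c)) = some (rotB k c) := by
  rcases rot_mem k c with h | h | h | h <;> rw [h] <;> decide

theorem dirOf_digit (c : Char) (hD : c ∈ ['1', '2', '3', '4']) :
    dirOf (String.ofList [c]) = some ((PySem.Int.ofStr? (String.ofList [c])).getD 0) := by
  fin_cases hD <;> decide

theorem dirOf_nondigit (c : Char) (hD : c ∉ ['1', '2', '3', '4']) :
    dirOf (String.ofList [c]) = none := by
  have h : ∀ d : Char, d ∈ ['1', '2', '3', '4'] → String.ofList [c] ≠ String.ofList [d] := by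
    intro d hd he
    have := congrArg String.toList he
    simp at this
    exact hD (this ▸ hd)
  unfold dirOf
  rw [if_neg (h '1' (by decide)), if_neg (h '2' (by decide)),
      if_neg (h '3' (by decide)), if_neg (h '4' (by decide))]

-- A's step on a turn char, phrased through dirOf
theorem stepA_char (ld : String) (labels : List String) (c : Char)
    (hT : c ∈ ['l', 'r', 'p', 'n']) :
    turnStepA (ld, labels) c =
      match dirOf ld with
      | none => (labels.getLastD "", labels)
      | some k => (PySem.Int.toStr (rotB k c), labels ++ [PySem.Int.toStr (rotB k c)]) := by
  fin_cases hT <;>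
    by_cases h1 : ld = "1" <;> by_cases h2 : ld = "2" <;>
    by_cases h3 : ld = "3" <;> by_cases h4 : ld = "4" <;>
    subst_vars <;> simp_all [turnStepA, dirOf, rotB] <;> rfl

theorem A_loop (cs : List Char) : ∀ (ld : String) (labels : List String), InvA ld labels →
    (cs.foldl turnStepA (ld, labels)).2 = labels ++ outA (dirOf ld) cs := by
  induction cs with
  | nil => intro ld labels _; simp [outA]
  | cons c cs ih =>
    intro ld labels hInv
    rw [List.foldl_cons]
    by_cases hT : c ∈ ['l', 'r', 'p', 'n']
    · rw [stepA_char ld labels c hT]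
      have hout : outA (dirOf ld) (c :: cs) =
          match dirOf ld with
          | none => outA none cs
          | some k => PySem.Int.toStr (rotB k c) :: outA (some (rotB k c)) cs := by
        cases dirOf ld with
        | none => simp only [outA]; rw [if_neg (not_not_intro hT)]
        | some k => simp only [outA]; rw [if_neg (not_not_intro hT)]
      rw [hout]
      cases hd : dirOf ld with
      | none =>
        have h2 := hInv hd
        show (cs.foldl turnStepA (labels.getLastD "", labels)).2 = labels ++ outA none cs
        rw [ih _ labels (fun _ => h2), h2]
      | some k =>
        show (cs.foldl turnStepA
            (PySem.Int.toStr (rotB k c), labels ++ [PySem.Int.toStr (rotB k c)])).2 =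
          labels ++ PySem.Int.toStr (rotB k c) :: outA (some (rotB k c)) cs
        rw [ih _ _ (fun h => by rw [dirOf_rot] at h; simp at h), dirOf_rot]
        simp
    · simp only [turnStepA, if_pos hT]
      by_cases hD : c ∈ ['1', '2', '3', '4']
      · rw [if_pos hD]
        rw [ih _ _ (fun h => by rw [dirOf_digit c hD] at h; simp at h)]
        have hout : outA (dirOf ld) (c :: cs) =
            String.ofList [c] ::
              outA (some ((PySem.Int.ofStr? (String.ofList [c])).getD 0)) cs := by
          simp [outA, hT, hD]
        rw [hout, dirOf_digit c hD]
        simp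
      · rw [if_neg hD]
        rw [ih ld _ (fun h => by rw [List.getLastD_concat]; exact dirOf_nondigit c hD)]
        have hout : outA (dirOf ld) (c :: cs) = String.ofList [c] :: outA (dirOf ld) cs := by
          simp [outA, hT, hD]
        rw [hout]
        simp

theorem B_stage2 (seg : List Char) : ∀ (k : Int) (buf : List String),
    (seg.foldl bStage2Step (k, buf)).2 = buf ++ rew k seg := by
  induction seg with
  | nil => intro k buf; simp [rew]
  | cons c cs ih =>
    intro k buf
    by_cases hT : c ∈ ['l', 'r', 'p', 'n'] <;>
      simp [bStage2Step, rew, hT, ih, rotB]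

theorem B_stage1 (cs : List Char) : ∀ (S : List (List Char)) (cur : List Char) (ds : List Int),
    ((cs.foldl bStage1Step (S, cur, ds)).1 ++ [(cs.foldl bStage1Step (S, cur, ds)).2.1]
      = S ++ (cur ++ (splitDg cs).1) :: ((splitDg cs).2.map Prod.snd))
    ∧ (cs.foldl bStage1Step (S, cur, ds)).2.2 = ds ++ (splitDg cs).2.map Prod.fst := by
  induction cs with
  | nil => intro S cur ds; simp [splitDg]
  | cons c cs ih =>
    intro S cur ds
    by_cases hD : c ∈ ['1', '2', '3', '4']
    · simp only [List.foldl_cons, bStage1Step, if_pos hD, splitDg]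
      obtain ⟨e1, e2⟩ := ih (S ++ [cur]) [] (ds ++ [(PySem.Int.ofStr? (String.ofList [c])).getD 0])
      refine ⟨?_, ?_⟩
      · rw [e1]; simp
      · rw [e2]; simp
    · simp only [List.foldl_cons, bStage1Step, if_neg hD, splitDg]
      obtain ⟨e1, e2⟩ := ih S (cur ++ [c]) ds
      refine ⟨?_, ?_⟩
      · rw [e1]; simp
      · rw [e2]

theorem J_nil : J [] = [] := rfl

theorem J_cons (s : String) (parts : List String) : J (s :: parts) = s.toList ++ J parts := rfl

theorem emit_cons (p : Int × List Char) (ps : List (Int × List Char)) :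
    emit (p :: ps) = ((PySem.Int.toStr p.1).toList ++ J (rew p.1 p.2)) ++ emit ps := rfl

theorem L1 (cs : List Char) : ∀ (k : Int),
    J (outA (some k) cs) = J (rew k (splitDg cs).1) ++ emit (splitDg cs).2 := by
  induction cs with
  | nil => intro k; simp [outA, splitDg, rew, J, emit]
  | cons c cs ih =>
    intro k
    by_cases hD : c ∈ ['1', '2', '3', '4']
    · have hT : c ∉ ['l', 'r', 'p', 'n'] := by fin_cases hD <;> decide
      simp only [outA, splitDg, if_pos hD, if_pos hT, rew, J_nil, J_cons, emit_cons, ih]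
      have hcv : PySem.Int.toChars ((PySem.Int.ofChars? [c]).getD 0) = [c] := by
        fin_cases hD <;> decide
      simp [hcv]
    · by_cases hT : c ∈ ['l', 'r', 'p', 'n']
      · simp only [outA, splitDg, if_neg hD, if_neg (not_not_intro hT), rew, if_pos hT,
          J_cons, ih]
        simp
      · simp only [outA, splitDg, if_neg hD, if_pos hT, rew, if_neg hT, J_cons, ih]
        simp

theorem L0 (cs : List Char) :
    J (outA none cs) =
      (splitDg cs).1.filter (fun c => c ∉ ['l', 'r', 'p', 'n']) ++ emit (splitDg cs).2 := by
  induction cs with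
  | nil => simp [outA, splitDg, J, emit]
  | cons c cs ih =>
    by_cases hD : c ∈ ['1', '2', '3', '4']
    · have hT : c ∉ ['l', 'r', 'p', 'n'] := by fin_cases hD <;> decide
      simp only [outA, splitDg, if_pos hD, if_pos hT, J_cons, emit_cons, L1]
      have hcv : PySem.Int.toChars ((PySem.Int.ofChars? [c]).getD 0) = [c] := by
        fin_cases hD <;> decide
      simp [hcv]
    · by_cases hT : c ∈ ['l', 'r', 'p', 'n']
      · simp only [outA, splitDg, if_neg hD, if_neg (not_not_intro hT), ih]
        fin_cases hT <;> simp
      · obtain ⟨n1, n2, n3, n4⟩ : ¬c = 'l' ∧ ¬c = 'r' ∧ ¬c = 'p' ∧ ¬c = 'n' := by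
          simpa [not_or] using hT
        simp only [outA, splitDg, if_neg hD, if_pos hT, J_cons, ih]
        simp [n1, n2, n3, n4]

theorem A_toList (turn : String) :
    (turn_to_label turn).toList = J (outA none turn.toList) := by
  unfold turn_to_label
  rw [toList_join_nil, A_loop turn.toList "" [] (fun _ => by decide)]
  rw [show dirOf "" = none by decide]
  simp

theorem B_toList (turn : String) :
    (turn_to_label_alt turn).toList =
      (splitDg turn.toList).1.filter (fun c => c ∉ ['l', 'r', 'p', 'n'])
        ++ emit (splitDg turn.toList).2 := by
  simp only [turn_to_label_alt]
  obtain ⟨e1, e2⟩ := B_stage1 turn.toList [] [] []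
  simp only [List.nil_append] at e1 e2
  rw [e1, e2, pyGet?_zero, slice_one]
  simp only [List.drop_one, List.tail_cons, Option.getD_some]
  rw [show ((splitDg turn.toList).2.map Prod.fst).zip ((splitDg turn.toList).2.map Prod.snd)
        = (splitDg turn.toList).2 from (List.zip_of_prod rfl rfl).symm,
      PySem.List.foldl_append_singleton_eq_map]
  rw [toList_join_nil]
  have hf : ∀ p : Int × List Char,
      (PySem.Str.join "" ((p.2.foldl bStage2Step (p.1, [PySem.Int.toStr p.1])).2)).toList =
        (PySem.Int.toStr p.1).toList ++ J (rew p.1 p.2) := by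
    intro p
    rw [B_stage2, toList_join_nil]
    simp [J]
  simp [J, emit, List.map_map, Function.comp_def, hf]

-- ===== VERDICT (by name: the statement is the Claim_ definition above) =====
theorem turn_to_label_spec : Claim_equal_turn_to_label := by
  intro turn _ _
  unfold Spec_turn_to_label
  apply String.toList_inj.mp
  rw [A_toList, B_toList, L0]

@[simp] theorem turn_to_label_raises : Claim_raises_turn_to_label := by
  unfold Claim_raises_turn_to_label
  refine ⟨?_, by decide, by decide, by decide⟩
  intro turn _
  unfold Raises_turn_to_label Pre_turn_to_label
  cases turn.toList.head? with
  | none => intro hr; simp at hr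
  | some c =>
    intro hr
    simp at hr
    rcases hr with rfl | rfl | rfl | rfl <;> decide
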